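-- pv_equiv track=rewrite | github.com/francistse/ascii-comic-mcp | server.py | _draw_star
-- ===== SOURCE A (Python) =====
-- def _draw_star(width: int, height: int, fill: str) -> str:
--     """Draw a star shape"""
--     lines = []
--     center = width // 2
--     for y in range(height):
--         line = ' ' * width
--         if y < height // 3:
--             line_list = list(line)
--             line_list[center] = fill
--             if center - 1 >= 0:
--                 line_list[center - 1] = fill
--             if center + 1 < width:
--                 line_list[center + 1] = fill
--             line = ''.join(line_list)
--         elif y < height * 2 // 3:
--             line = fill * width
--         else:
--             line_list = list(line)
--             line_list[center] = fill
--             line = ''.join(line_list)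
--         lines.append(line)
--     return '\n'.join(lines)
-- ===== SOURCE B (Python) =====
-- def _draw_star(width: int, height: int, fill: str) -> str:
--     """Draw a star shape: build each distinct row once, then repeat by region size."""
--     if height <= 0:
--         return ''
--     center = width // 2
--     lo = max(center - 1, 0)
--     hi = min(center + 1, width - 1)
--     top = ' ' * lo + fill * (hi - lo + 1) + ' ' * (width - 1 - hi)
--     mid = fill * width
--     bot = ' ' * center + fill + ' ' * (width - 1 - center)
--     n1 = height // 3
--     n2 = height * 2 // 3 - n1
--     n3 = height - height * 2 // 3
--     rows = [top] * n1 + [mid] * n2 + [bot] * n3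
--     return '\n'.join(rows)
-- ===== Notes on version B (the rewrite author's own statement) =====
-- stated objective: alternative
-- what changed: Instead of looping over every row and mutating a per-row character list, B computes each of the three distinct row strings once in closed form (clamped fill segment / full row / single center fill) and assembles the grid as [top]*n1 + [mid]*n2 + [bot]*n3 with region sizes taken from the integer divisions, then joins once.
import Mathlib
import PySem

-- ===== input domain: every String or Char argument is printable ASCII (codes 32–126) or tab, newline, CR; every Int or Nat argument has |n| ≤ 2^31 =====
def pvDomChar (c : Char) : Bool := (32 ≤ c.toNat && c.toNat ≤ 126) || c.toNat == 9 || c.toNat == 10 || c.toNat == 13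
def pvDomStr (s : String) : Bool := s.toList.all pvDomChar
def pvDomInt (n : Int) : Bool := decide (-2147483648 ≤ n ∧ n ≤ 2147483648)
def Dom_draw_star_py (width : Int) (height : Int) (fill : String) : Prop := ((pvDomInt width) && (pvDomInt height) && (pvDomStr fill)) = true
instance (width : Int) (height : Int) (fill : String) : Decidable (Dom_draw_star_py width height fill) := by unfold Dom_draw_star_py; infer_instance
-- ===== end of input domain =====

-- B builds each of the three distinct row strings once in closed form and repeats them by region
-- size, instead of A's per-row loop that mutates a per-row character list (objective: alternative).

-- ===== PORT A =====
-- body of A's for-loop: the row string for row y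
def rowA (width : Int) (height : Int) (center : Int) (F : List Char) (y : Int) : List Char :=
  let line : List Char := PySem.List.pyRepeat [' '] width
  if y < PySem.Int.floordiv height 3 then
    let ll := line.map (fun c => ([c] : List Char))
    let ll := PySem.List.pySetD ll center F
    let ll := if center - 1 ≥ 0 then PySem.List.pySetD ll (center - 1) F else ll
    let ll := if center + 1 < width then PySem.List.pySetD ll (center + 1) F else ll
    PySem.Chars.join [] ll
  else if y < PySem.Int.floordiv (height * 2) 3 then
    PySem.List.pyRepeat F width
  else
    let ll := line.map (fun c => ([c] : List Char))
    let ll := PySem.List.pySetD ll center F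
    PySem.Chars.join [] ll

-- A's for-loop: one row appended to `lines` per y, in order
def rowsA (width : Int) (height : Int) (center : Int) (F : List Char) : List Int → List (List Char)
  | [] => []
  | y :: ys => rowA width height center F y :: rowsA width height center F ys

def draw_star_py (width : Int) (height : Int) (fill : String) : String :=
  let center := PySem.Int.floordiv width 2
  let lines : List (List Char) :=
    rowsA width height center fill.toList (PySem.List.pyRange 0 height 1)
  String.ofList (PySem.Chars.join ['\n'] lines)

-- ===== PORT B =====
-- top = ' ' * lo + fill * (hi - lo + 1) + ' ' * (width - 1 - hi)
def topB (width : Int) (center : Int) (F : List Char) : List Char :=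
  let lo := max (center - 1) 0
  let hi := min (center + 1) (width - 1)
  PySem.List.pyRepeat [' '] lo ++ PySem.List.pyRepeat F (hi - lo + 1)
    ++ PySem.List.pyRepeat [' '] (width - 1 - hi)

-- bot = ' ' * center + fill + ' ' * (width - 1 - center)
def botB (width : Int) (center : Int) (F : List Char) : List Char :=
  PySem.List.pyRepeat [' '] center ++ F ++ PySem.List.pyRepeat [' '] (width - 1 - center)

def draw_star_py_alt (width : Int) (height : Int) (fill : String) : String :=
  if height ≤ 0 then "" else
  let center := PySem.Int.floordiv width 2
  let top := topB width center fill.toList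
  let mid := PySem.List.pyRepeat fill.toList width
  let bot := botB width center fill.toList
  let n1 := PySem.Int.floordiv height 3
  let n2 := PySem.Int.floordiv (height * 2) 3 - n1
  let n3 := height - PySem.Int.floordiv (height * 2) 3
  let rows : List (List Char) :=
    PySem.List.pyRepeat [top] n1 ++ PySem.List.pyRepeat [mid] n2 ++ PySem.List.pyRepeat [bot] n3
  String.ofList (PySem.Chars.join ['\n'] rows)

-- ===== PRECONDITION & SPEC =====
-- Pre_ excludes exactly the inputs where A raises IndexError: width ≤ 0 with height ≥ 1,
-- where `line_list[center]` indexes an empty list.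
def Pre_draw_star_py (width : Int) (height : Int) (fill : String) : Prop :=
  1 ≤ width ∨ height ≤ 0
instance (width : Int) (height : Int) (fill : String) : Decidable (Pre_draw_star_py width height fill) := by unfold Pre_draw_star_py; infer_instance
def pvWitness_draw_star_py : Int × Int × String := (5, 6, "*")

def Spec_draw_star_py (width : Int) (height : Int) (fill : String) (out : String) : Prop := out = draw_star_py_alt width height fill
instance (width : Int) (height : Int) (fill : String) (out : String) : Decidable (Spec_draw_star_py width height fill out) := by unfold Spec_draw_star_py; infer_instance

-- ===== CLAIM (what is proved, stated in full; the proofs are below) =====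
def Claim_equal_draw_star_py : Prop := ∀ (width : Int) (height : Int) (fill : String), Dom_draw_star_py width height fill → Pre_draw_star_py width height fill → Spec_draw_star_py width height fill (draw_star_py width height fill)

-- ===== LEMMAS AND PROOFS =====

-- the row loop produces one row per y
theorem rowsA_eq_map (width height center : Int) (F : List Char) (ys : List Int) :
    rowsA width height center F ys = ys.map (rowA width height center F) := by
  induction ys with
  | nil => rfl
  | cons y ys ih => simp [rowsA, ih]

-- ''.join of a list of chunks is their concatenation (PySem.Chars.join with empty separator).
theorem join_nil_flatten (parts : List (List Char)) :
    PySem.Chars.join [] parts = parts.flatten := by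
  induction parts with
  | nil => rfl
  | cons p ps ih =>
    cases ps with
    | nil => simp [PySem.Chars.join, List.intercalate]
    | cons q qs => simp [PySem.Chars.join_cons_cons, ih]

-- writing a cell at a list boundary
theorem set_mid {α : Type} (p q : List α) (x F : α) (i : Nat) (h : i = p.length) :
    (p ++ x :: q).set i F = p ++ F :: q := by
  subst h
  simp

-- a replicate split at a cell
theorem rep_split (w c : Nat) (hc : c < w) (a : List Char) :
    List.replicate w a = List.replicate c a ++ a :: List.replicate (w - c - 1) a := by
  conv_lhs => rw [show w = c + (w - c - 1 + 1) from by omega]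
  rw [List.replicate_add, List.replicate_succ]

-- a space row with one cell set to F
theorem chain1 (w c : Nat) (hc : c < w) (a : Char) (F : List Char) :
    (List.replicate w ([a] : List Char)).set c F
      = List.replicate c ([a] : List Char) ++ [F] ++ List.replicate (w - c - 1) ([a] : List Char) := by
  rw [rep_split w c hc, set_mid _ _ _ _ c (by simp)]
  simp

-- a space row with cells c-1, c, c+1 set to F (case 1 ≤ c, c+1 < w)
theorem chain3 (w c : Nat) (h1 : 1 ≤ c) (h2 : c + 1 < w) (a : Char) (F : List Char) :
    (((List.replicate w ([a] : List Char)).set c F).set (c - 1) F).set (c + 1) F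
      = List.replicate (c - 1) ([a] : List Char) ++ [F, F, F]
          ++ List.replicate (w - c - 2) ([a] : List Char) := by
  rw [rep_split w c (by omega), set_mid _ _ _ _ c (by simp)]
  rw [rep_split c (c - 1) (by omega), show c - (c - 1) - 1 = 0 by omega]
  simp only [List.replicate_zero, List.nil_append, List.append_assoc, List.cons_append,
    List.nil_append]
  rw [set_mid (List.replicate (c - 1) [a]) _ _ _ (c - 1) (by simp)]
  rw [rep_split (w - c - 1) 0 (by omega), show w - c - 1 - 0 - 1 = w - c - 2 by omega]
  simp only [List.replicate_zero, List.nil_append]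
  rw [show (c + 1) = c - 1 + 2 by omega]
  have := set_mid (List.replicate (c - 1) ([a] : List Char) ++ [F, F])
    (List.replicate (w - c - 2) ([a] : List Char)) [a] F (c - 1 + 2) (by simp)
  simp only [List.append_assoc, List.cons_append, List.nil_append] at this ⊢
  rw [this]

-- A's first-region row equals B's top row
theorem rowA_top (width height : Int) (hw : 1 ≤ width) (F : List Char) (y : Int)
    (hy : y < PySem.Int.floordiv height 3) :
    rowA width height (PySem.Int.floordiv width 2) F y
      = topB width (PySem.Int.floordiv width 2) F := by
  obtain ⟨w, rfl⟩ : ∃ n : Nat, width = (n : Int) := ⟨width.toNat, by omega⟩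
  have hw' : 1 ≤ w := by exact_mod_cast hw
  have hc : PySem.Int.floordiv (w : Int) 2 = ((w / 2 : Nat) : Int) := by
    exact_mod_cast PySem.Int.floordiv_natCast w 2
  unfold rowA topB
  rw [if_pos hy, hc]
  simp only [PySem.List.pyRepeat_singleton, Int.toNat_natCast, List.map_replicate]
  rcases Nat.lt_or_ge w 3 with h3 | h3
  · -- w = 1 or w = 2
    interval_cases w <;>
      norm_num [PySem.List.pySetD, PySem.List.pySet?, PySem.List.pyIdx?, PySem.List.pyRepeat,
        join_nil_flatten, List.replicate, List.flatten] <;>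
      simp [List.replicate]
  · -- w ≥ 3 : c ≥ 1 and c + 1 < w
    have hc1 : 1 ≤ w / 2 := by omega
    have hc2 : w / 2 + 1 < w := by omega
    rw [if_pos (by push_cast; omega), if_pos (by push_cast; omega)]
    have e1 : ((w / 2 : Nat) : Int) - 1 = ((w / 2 - 1 : Nat) : Int) := by omega
    have e2 : ((w / 2 : Nat) : Int) + 1 = ((w / 2 + 1 : Nat) : Int) := by omega
    rw [e1, e2, PySem.List.pySetD_natCast, PySem.List.pySetD_natCast, PySem.List.pySetD_natCast]
    rw [chain3 w (w / 2) hc1 hc2]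
    have elo : max (((w / 2 - 1 : Nat) : Int)) 0 = ((w / 2 - 1 : Nat) : Int) := by omega
    have ehi : min (((w / 2 + 1 : Nat) : Int)) ((w : Int) - 1) = ((w / 2 + 1 : Nat) : Int) := by omega
    rw [elo, ehi]
    have ecnt : ((w / 2 + 1 : Nat) : Int) - ((w / 2 - 1 : Nat) : Int) + 1 = 3 := by omega
    have etail : (w : Int) - 1 - ((w / 2 + 1 : Nat) : Int) = ((w - w / 2 - 2 : Nat) : Int) := by omega
    rw [ecnt, etail]
    simp [join_nil_flatten, List.flatten_append, PySem.List.pyRepeat, List.replicate]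

-- A's middle-region row equals B's mid row
theorem rowA_mid (width height : Int) (center : Int) (F : List Char) (y : Int)
    (hy1 : ¬ y < PySem.Int.floordiv height 3)
    (hy2 : y < PySem.Int.floordiv (height * 2) 3) :
    rowA width height center F y = PySem.List.pyRepeat F width := by
  unfold rowA
  rw [if_neg hy1, if_pos hy2]

-- A's last-region row equals B's bot row
theorem rowA_bot (width height : Int) (hw : 1 ≤ width) (F : List Char) (y : Int)
    (hy1 : ¬ y < PySem.Int.floordiv height 3)
    (hy2 : ¬ y < PySem.Int.floordiv (height * 2) 3) :
    rowA width height (PySem.Int.floordiv width 2) F y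
      = botB width (PySem.Int.floordiv width 2) F := by
  obtain ⟨w, rfl⟩ : ∃ n : Nat, width = (n : Int) := ⟨width.toNat, by omega⟩
  have hw' : 1 ≤ w := by exact_mod_cast hw
  have hc : PySem.Int.floordiv (w : Int) 2 = ((w / 2 : Nat) : Int) := by
    exact_mod_cast PySem.Int.floordiv_natCast w 2
  unfold rowA botB
  rw [if_neg hy1, if_neg hy2, hc]
  simp only [PySem.List.pyRepeat_singleton, Int.toNat_natCast, List.map_replicate]
  rw [PySem.List.pySetD_natCast, chain1 w (w / 2) (by omega)]
  have etail : (w : Int) - 1 - ((w / 2 : Nat) : Int) = ((w - w / 2 - 1 : Nat) : Int) := by omega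
  rw [etail]
  simp [join_nil_flatten, List.flatten_append]

-- ===== VERDICT (by name: the statement is the Claim_ definition above) =====
theorem draw_star_py_spec : Claim_equal_draw_star_py := by
  intro width height fill _ hpre
  unfold Spec_draw_star_py draw_star_py draw_star_py_alt
  simp only [rowsA_eq_map]
  by_cases hh : height ≤ 0
  · rw [if_pos hh, PySem.List.pyRange_one_eq_nil hh]
    rfl
  · rw [if_neg hh]
    have hw : 1 ≤ width := hpre.resolve_right hh
    obtain ⟨h, rfl⟩ : ∃ n : Nat, height = (n : Int) := ⟨height.toNat, by omega⟩
    have e3 : PySem.Int.floordiv (h : Int) 3 = ((h / 3 : Nat) : Int) := by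
      exact_mod_cast PySem.Int.floordiv_natCast h 3
    have e23 : PySem.Int.floordiv ((h : Int) * 2) 3 = ((h * 2 / 3 : Nat) : Int) := by
      exact_mod_cast PySem.Int.floordiv_natCast (h * 2) 3
    have ht12 : h / 3 ≤ h * 2 / 3 := by omega
    have ht2h : h * 2 / 3 ≤ h := by omega
    rw [PySem.List.pyRange_one_append 0 ((h / 3 : Nat) : Int) (h : Int)
      (by positivity) (by exact_mod_cast Nat.div_le_self h 3)]
    rw [PySem.List.pyRange_one_append ((h / 3 : Nat) : Int) ((h * 2 / 3 : Nat) : Int) (h : Int)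
      (by exact_mod_cast ht12) (by exact_mod_cast ht2h)]
    rw [List.map_append, List.map_append]
    have p1 : (PySem.List.pyRange 0 ((h / 3 : Nat) : Int) 1).map
        (rowA width ((h : Int)) (PySem.Int.floordiv width 2) fill.toList)
        = List.replicate (h / 3) (topB width (PySem.Int.floordiv width 2) fill.toList) := by
      rw [List.map_congr_left (g := fun _ => topB width (PySem.Int.floordiv width 2) fill.toList)
        (by intro y hy
            rw [PySem.List.mem_pyRange_one] at hy
            exact rowA_top width _ hw fill.toList y (by rw [e3]; exact hy.2))]
      rw [List.map_const', PySem.List.length_pyRange_one]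
      congr 1
    have p2 : (PySem.List.pyRange ((h / 3 : Nat) : Int) ((h * 2 / 3 : Nat) : Int) 1).map
        (rowA width ((h : Int)) (PySem.Int.floordiv width 2) fill.toList)
        = List.replicate (h * 2 / 3 - h / 3) (PySem.List.pyRepeat fill.toList width) := by
      rw [List.map_congr_left (g := fun _ => PySem.List.pyRepeat fill.toList width)
        (by intro y hy
            rw [PySem.List.mem_pyRange_one] at hy
            exact rowA_mid width _ _ fill.toList y
              (by rw [e3]; omega) (by rw [e23]; exact_mod_cast hy.2))]
      rw [List.map_const', PySem.List.length_pyRange_one]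
      congr 1
      omega
    have p3 : (PySem.List.pyRange ((h * 2 / 3 : Nat) : Int) ((h : Int)) 1).map
        (rowA width ((h : Int)) (PySem.Int.floordiv width 2) fill.toList)
        = List.replicate (h - h * 2 / 3) (botB width (PySem.Int.floordiv width 2) fill.toList) := by
      rw [List.map_congr_left (g := fun _ => botB width (PySem.Int.floordiv width 2) fill.toList)
        (by intro y hy
            rw [PySem.List.mem_pyRange_one] at hy
            exact rowA_bot width _ hw fill.toList y
              (by rw [e3]; omega) (by rw [e23]; omega))]
      rw [List.map_const', PySem.List.length_pyRange_one]
      congr 1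
      omega
    rw [p1, p2, p3]
    simp only [PySem.List.pyRepeat_singleton, e3, e23]
    have q1 : (((h / 3 : Nat) : Int)).toNat = h / 3 := by omega
    have q2 : ((((h * 2 / 3 : Nat) : Int)) - (((h / 3 : Nat) : Int))).toNat = h * 2 / 3 - h / 3 := by
      omega
    have q3 : (((h : Int)) - (((h * 2 / 3 : Nat) : Int))).toNat = h - h * 2 / 3 := by omega
    rw [q1, q2, q3, List.append_assoc]
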